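-- pv_equiv track=rewrite | github.com/OARNAUCNLAEY/AOC | I.py | intersect_with_border
-- ===== SOURCE A (Python) =====
-- def intersect_with_border(cord1, cord2, cords):
--     for i in range(len(cords) - 1):
--         if cords[i][0] == cords[i + 1][0]:
--             x = cords[i][0]
--             for y in range(min(cords[i][1], cords[i + 1][1]), max(cords[i][1], cords[i + 1][1]) + 1):
--                 if x > min(cord1[0], cord2[0]) and x < max(cord1[0], cord2[0]) and y > min(cord1[1], cord2[1]) and y < max(cord1[1], cord2[1]):
--                     return True
--         else:
--             y = cords[i][1]
--             for x in range(min(cords[i][0], cords[i + 1][0]), max(cords[i][0], cords[i + 1][0]) + 1):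
--                 if x > min(cord1[0], cord2[0]) and x < max(cord1[0], cord2[0]) and y > min(cord1[1], cord2[1]) and y < max(cord1[1], cord2[1]):
--                     return True
--     return False
-- ===== SOURCE B (Python) =====
-- def intersect_with_border(cord1, cord2, cords):
--     # O(1) interval-overlap test per segment instead of walking every lattice point.
--     x_lo = min(cord1[0], cord2[0])
--     x_hi = max(cord1[0], cord2[0])
--     y_lo = min(cord1[1], cord2[1])
--     y_hi = max(cord1[1], cord2[1])
--     for p, q in zip(cords, cords[1:]):
--         if p[0] == q[0]:
--             if x_lo < p[0] < x_hi and max(min(p[1], q[1]), y_lo + 1) <= min(max(p[1], q[1]), y_hi - 1):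
--                 return True
--         else:
--             if y_lo < p[1] < y_hi and max(min(p[0], q[0]), x_lo + 1) <= min(max(p[0], q[0]), x_hi - 1):
--                 return True
--     return False
-- ===== Notes on version B (the rewrite author's own statement) =====
-- stated objective: faster
-- what changed: B replaces A's inner loop over every lattice point of each axis-aligned segment by a constant-time interval-overlap test (clamped interval nonempty check) per segment, iterating segments via zip of adjacent points.
-- outside the precondition, e.g. on intersect_with_border((), (), []): A returns False, B raises IndexError; on intersect_with_border((0, 4), (4, 0), [(1, 1), (1, 3), (9,)]): A returns True, B returns True
import Mathlib
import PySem

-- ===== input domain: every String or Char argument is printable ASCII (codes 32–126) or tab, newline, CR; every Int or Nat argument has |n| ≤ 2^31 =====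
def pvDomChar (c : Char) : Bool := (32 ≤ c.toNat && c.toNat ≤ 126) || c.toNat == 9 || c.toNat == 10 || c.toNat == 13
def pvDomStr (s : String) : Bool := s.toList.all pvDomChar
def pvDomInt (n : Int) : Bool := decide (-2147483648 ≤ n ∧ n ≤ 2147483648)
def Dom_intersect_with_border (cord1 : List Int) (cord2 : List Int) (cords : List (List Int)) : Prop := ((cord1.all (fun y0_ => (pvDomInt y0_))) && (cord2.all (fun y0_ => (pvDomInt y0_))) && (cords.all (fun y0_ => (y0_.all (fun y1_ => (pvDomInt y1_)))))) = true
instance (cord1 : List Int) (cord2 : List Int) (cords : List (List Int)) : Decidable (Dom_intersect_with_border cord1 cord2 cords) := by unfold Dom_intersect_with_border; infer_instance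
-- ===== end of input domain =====

-- B replaces A's per-lattice-point inner loop by an O(1) interval-overlap test per segment (objective: faster, asymptotic).

-- ===== PORT A =====
def intersect_with_border (cord1 : List Int) (cord2 : List Int) (cords : List (List Int)) : Bool :=
  (PySem.List.pyRange 0 ((cords.length : Int) - 1) 1).any (fun i =>
    let ci : List Int := PySem.List.pyGetD cords i []
    let cj : List Int := PySem.List.pyGetD cords (i + 1) []
    if PySem.List.pyGetD ci 0 0 = PySem.List.pyGetD cj 0 0 then
      let x := PySem.List.pyGetD ci 0 0
      (PySem.List.pyRange (min (PySem.List.pyGetD ci 1 0) (PySem.List.pyGetD cj 1 0))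
          (max (PySem.List.pyGetD ci 1 0) (PySem.List.pyGetD cj 1 0) + 1) 1).any (fun y =>
        decide (min (PySem.List.pyGetD cord1 0 0) (PySem.List.pyGetD cord2 0 0) < x ∧
                x < max (PySem.List.pyGetD cord1 0 0) (PySem.List.pyGetD cord2 0 0) ∧
                min (PySem.List.pyGetD cord1 1 0) (PySem.List.pyGetD cord2 1 0) < y ∧
                y < max (PySem.List.pyGetD cord1 1 0) (PySem.List.pyGetD cord2 1 0)))
    else
      let y := PySem.List.pyGetD ci 1 0
      (PySem.List.pyRange (min (PySem.List.pyGetD ci 0 0) (PySem.List.pyGetD cj 0 0))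
          (max (PySem.List.pyGetD ci 0 0) (PySem.List.pyGetD cj 0 0) + 1) 1).any (fun x =>
        decide (min (PySem.List.pyGetD cord1 0 0) (PySem.List.pyGetD cord2 0 0) < x ∧
                x < max (PySem.List.pyGetD cord1 0 0) (PySem.List.pyGetD cord2 0 0) ∧
                min (PySem.List.pyGetD cord1 1 0) (PySem.List.pyGetD cord2 1 0) < y ∧
                y < max (PySem.List.pyGetD cord1 1 0) (PySem.List.pyGetD cord2 1 0))))

-- ===== PORT B =====
def intersect_with_border_alt (cord1 : List Int) (cord2 : List Int) (cords : List (List Int)) : Bool :=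
  let xlo := min (PySem.List.pyGetD cord1 0 0) (PySem.List.pyGetD cord2 0 0)
  let xhi := max (PySem.List.pyGetD cord1 0 0) (PySem.List.pyGetD cord2 0 0)
  let ylo := min (PySem.List.pyGetD cord1 1 0) (PySem.List.pyGetD cord2 1 0)
  let yhi := max (PySem.List.pyGetD cord1 1 0) (PySem.List.pyGetD cord2 1 0)
  (cords.zip (PySem.List.slice cords (some 1) none)).any (fun pq =>
    let p := pq.1
    let q := pq.2
    if PySem.List.pyGetD p 0 0 = PySem.List.pyGetD q 0 0 then
      decide (xlo < PySem.List.pyGetD p 0 0 ∧ PySem.List.pyGetD p 0 0 < xhi ∧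
              max (min (PySem.List.pyGetD p 1 0) (PySem.List.pyGetD q 1 0)) (ylo + 1) ≤
              min (max (PySem.List.pyGetD p 1 0) (PySem.List.pyGetD q 1 0)) (yhi - 1))
    else
      decide (ylo < PySem.List.pyGetD p 1 0 ∧ PySem.List.pyGetD p 1 0 < yhi ∧
              max (min (PySem.List.pyGetD p 0 0) (PySem.List.pyGetD q 0 0)) (xlo + 1) ≤
              min (max (PySem.List.pyGetD p 0 0) (PySem.List.pyGetD q 0 0)) (xhi - 1)))

-- ===== PRECONDITION & SPEC =====
-- Pre_ excludes inputs where a coordinate list has fewer than two components: Python A raises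
-- IndexError on them when reached (and B, which reads the rectangle bounds up front, raises on
-- any under-length cord1/cord2); on unreached malformed points after an early True both agree.
def Pre_intersect_with_border (cord1 : List Int) (cord2 : List Int) (cords : List (List Int)) : Prop :=
  2 ≤ cord1.length ∧ 2 ≤ cord2.length ∧ (2 ≤ cords.length → ∀ c ∈ cords, 2 ≤ c.length)
instance (cord1 : List Int) (cord2 : List Int) (cords : List (List Int)) : Decidable (Pre_intersect_with_border cord1 cord2 cords) := by unfold Pre_intersect_with_border; infer_instance

def pvWitness_intersect_with_border : List Int × List Int × List (List Int) :=
  ([0, 4], [4, 0], [[1, 1], [1, 3]])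

def Spec_intersect_with_border (cord1 : List Int) (cord2 : List Int) (cords : List (List Int)) (out : Bool) : Prop := out = intersect_with_border_alt cord1 cord2 cords
instance (cord1 : List Int) (cord2 : List Int) (cords : List (List Int)) (out : Bool) : Decidable (Spec_intersect_with_border cord1 cord2 cords out) := by unfold Spec_intersect_with_border; infer_instance

-- ===== CLAIM (what is proved, stated in full; the proofs are below) =====
def Claim_equal_intersect_with_border : Prop := ∀ (cord1 : List Int) (cord2 : List Int) (cords : List (List Int)), Dom_intersect_with_border cord1 cord2 cords → Pre_intersect_with_border cord1 cord2 cords → Spec_intersect_with_border cord1 cord2 cords (intersect_with_border cord1 cord2 cords)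

-- ===== LEMMAS AND PROOFS =====

-- vertical segment: walking y over [min a b, max a b] looking for a strictly interior point
-- equals the clamped-interval nonemptiness test
theorem pv_vert (a b x cx1 cx2 cy1 cy2 : Int) :
    ((PySem.List.pyRange (min a b) (max a b + 1) 1).any (fun y =>
        decide (cx1 < x ∧ x < cx2 ∧ cy1 < y ∧ y < cy2)))
    = decide (cx1 < x ∧ x < cx2 ∧ max (min a b) (cy1 + 1) ≤ min (max a b) (cy2 - 1)) := by
  rw [Bool.eq_iff_iff]
  simp only [List.any_eq_true, PySem.List.mem_pyRange_one, decide_eq_true_eq]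
  constructor
  · rintro ⟨y, ⟨h1, h2⟩, h3, h4, h5, h6⟩
    exact ⟨h3, h4, by omega⟩
  · rintro ⟨h1, h2, h3⟩
    exact ⟨max (min a b) (cy1 + 1), ⟨by omega, by omega⟩, h1, h2, by omega, by omega⟩

-- horizontal segment: same, walking x
theorem pv_horiz (a b y cx1 cx2 cy1 cy2 : Int) :
    ((PySem.List.pyRange (min a b) (max a b + 1) 1).any (fun x =>
        decide (cx1 < x ∧ x < cx2 ∧ cy1 < y ∧ y < cy2)))
    = decide (cy1 < y ∧ y < cy2 ∧ max (min a b) (cx1 + 1) ≤ min (max a b) (cx2 - 1)) := by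
  rw [Bool.eq_iff_iff]
  simp only [List.any_eq_true, PySem.List.mem_pyRange_one, decide_eq_true_eq]
  constructor
  · rintro ⟨x, ⟨h1, h2⟩, h3, h4, h5, h6⟩
    exact ⟨h5, h6, by omega⟩
  · rintro ⟨h1, h2, h3⟩
    exact ⟨max (min a b) (cx1 + 1), ⟨by omega, by omega⟩, by omega, by omega, h1, h2⟩

-- index-driven scan over adjacent pairs = scan over zip of the list with its tail (Nat-range form)
theorem pv_any_adjacent_nat (l : List (List Int)) (F : List Int → List Int → Bool) :
    (List.range (l.length - 1)).any (fun k => F (l.getD k []) (l.getD (k + 1) []))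
      = (l.zip l.tail).any (fun pq => F pq.1 pq.2) := by
  rw [Bool.eq_iff_iff]
  simp only [List.any_eq_true, List.mem_range]
  constructor
  · rintro ⟨k, hk, hF⟩
    have h1 : k < l.length := by omega
    have h2 : k + 1 < l.length := by omega
    refine ⟨(l[k], l[k + 1]), ?_, ?_⟩
    · rw [List.mem_iff_getElem]
      refine ⟨k, ?_, ?_⟩
      · simp only [List.length_zip, List.length_tail]
        omega
      · simp [List.getElem_zip, List.getElem_tail]
    · simpa [List.getD, List.getElem?_eq_getElem h1, List.getElem?_eq_getElem h2] using hF
  · rintro ⟨pq, hmem, hF⟩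
    obtain ⟨i, hi, heq⟩ := List.mem_iff_getElem.1 hmem
    have hi' : i < l.length - 1 := by
      simp only [List.length_zip, List.length_tail] at hi
      omega
    have h1 : i < l.length := by omega
    have h2 : i + 1 < l.length := by omega
    have hpq : pq = (l[i], l[i + 1]) := by
      rw [← heq]
      simp [List.getElem_zip, List.getElem_tail]
    rw [hpq] at hF
    refine ⟨i, hi', ?_⟩
    simpa [List.getD, List.getElem?_eq_getElem h1, List.getElem?_eq_getElem h2] using hF

-- same statement, with A's Int pyRange / pyGetD on the left
theorem pv_any_adjacent (l : List (List Int)) (F : List Int → List Int → Bool) :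
    (PySem.List.pyRange 0 ((l.length : Int) - 1) 1).any (fun i =>
        F (PySem.List.pyGetD l i []) (PySem.List.pyGetD l (i + 1) []))
      = (l.zip l.tail).any (fun pq => F pq.1 pq.2) := by
  rw [PySem.List.pyRange_one, List.any_map]
  have hcast : (((l.length : Int) - 1 - 0)).toNat = l.length - 1 := by omega
  rw [hcast, ← pv_any_adjacent_nat l F]
  refine PySem.List.any_congr_mem ?_
  intro k _
  have h2 : ((k : Int) + 1) = (((k + 1 : Nat)) : Int) := by push_cast; ring
  simp only [Function.comp_apply, zero_add, h2, PySem.List.pyGetD_natCast]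

-- ===== VERDICT (by name: the statement is the Claim_ definition above) =====
theorem intersect_with_border_spec : Claim_equal_intersect_with_border := by
  intro cord1 cord2 cords _ _
  unfold Spec_intersect_with_border intersect_with_border intersect_with_border_alt
  simp only [pv_vert, pv_horiz, PySem.List.slice_from_one]
  exact pv_any_adjacent cords (fun p q =>
    if PySem.List.pyGetD p 0 0 = PySem.List.pyGetD q 0 0 then
      decide (min (PySem.List.pyGetD cord1 0 0) (PySem.List.pyGetD cord2 0 0) < PySem.List.pyGetD p 0 0 ∧
        PySem.List.pyGetD p 0 0 < max (PySem.List.pyGetD cord1 0 0) (PySem.List.pyGetD cord2 0 0) ∧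
        max (min (PySem.List.pyGetD p 1 0) (PySem.List.pyGetD q 1 0)) (min (PySem.List.pyGetD cord1 1 0) (PySem.List.pyGetD cord2 1 0) + 1) ≤
        min (max (PySem.List.pyGetD p 1 0) (PySem.List.pyGetD q 1 0)) (max (PySem.List.pyGetD cord1 1 0) (PySem.List.pyGetD cord2 1 0) - 1))
    else
      decide (min (PySem.List.pyGetD cord1 1 0) (PySem.List.pyGetD cord2 1 0) < PySem.List.pyGetD p 1 0 ∧
        PySem.List.pyGetD p 1 0 < max (PySem.List.pyGetD cord1 1 0) (PySem.List.pyGetD cord2 1 0) ∧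
        max (min (PySem.List.pyGetD p 0 0) (PySem.List.pyGetD q 0 0)) (min (PySem.List.pyGetD cord1 0 0) (PySem.List.pyGetD cord2 0 0) + 1) ≤
        min (max (PySem.List.pyGetD p 0 0) (PySem.List.pyGetD q 0 0)) (max (PySem.List.pyGetD cord1 0 0) (PySem.List.pyGetD cord2 0 0) - 1)))
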